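-- pv_equiv track=rewrite | github.com/mwwoodworth/brainops-ai-agents | aurea_nlu_processor.py | _normalize_allowed_scopes
-- ===== SOURCE A (Python) =====
-- from typing import Any, Optional
--
-- def _normalize_allowed_scopes(raw_scopes: Any) -> set[str]:
--     scopes: set[str] = set()
--     if isinstance(raw_scopes, str):
--         scopes = {part.strip().lower() for part in raw_scopes.split(",") if part.strip()}
--     elif isinstance(raw_scopes, (list, tuple, set)):
--         scopes = {str(part).strip().lower() for part in raw_scopes if str(part).strip()}
--
--     scopes = {scope for scope in scopes if scope in {"read_only", "operator", "admin"}}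
--     if "admin" in scopes:
--         scopes.update({"operator", "read_only"})
--     elif "operator" in scopes:
--         scopes.add("read_only")
--     if not scopes:
--         scopes = {"read_only"}
--     return scopes
-- ===== SOURCE B (Python) =====
-- from typing import Any
--
--
-- def _normalize_allowed_scopes(raw_scopes: Any) -> set[str]:
--     order = ["read_only", "operator", "admin"]
--     if isinstance(raw_scopes, str):
--         parts = [p.strip().lower() for p in raw_scopes.split(",")]
--     elif isinstance(raw_scopes, (list, tuple, set)):
--         parts = [str(p).strip().lower() for p in raw_scopes]
--     else:
--         parts = []
--     m = max((order.index(s) for s in parts if s in order), default=0)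
--     return set(order[: m + 1])
-- ===== Notes on version B (the rewrite author's own statement) =====
-- stated objective: simpler
-- what changed: Replaces the admin/operator cascading set-union expansion (and the separate empty-part filter plus valid-set intersection) with a ranking: take the maximum index of any recognized scope in the hierarchy list ['read_only','operator','admin'] (default 0) and return the set of that prefix, which is the hierarchy's downward closure.
import Mathlib
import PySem

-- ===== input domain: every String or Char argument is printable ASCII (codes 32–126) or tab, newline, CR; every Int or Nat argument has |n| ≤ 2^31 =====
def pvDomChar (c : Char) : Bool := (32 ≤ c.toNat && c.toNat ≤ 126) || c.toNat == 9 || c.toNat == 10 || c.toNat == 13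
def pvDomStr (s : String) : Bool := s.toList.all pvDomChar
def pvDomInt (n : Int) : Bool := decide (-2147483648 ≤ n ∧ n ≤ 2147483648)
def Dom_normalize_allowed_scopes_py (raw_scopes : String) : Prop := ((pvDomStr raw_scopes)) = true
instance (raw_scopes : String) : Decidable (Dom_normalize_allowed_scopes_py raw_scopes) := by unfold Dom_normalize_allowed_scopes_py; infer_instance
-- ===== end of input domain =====

-- B replaces A's admin/operator cascading union expansion with a max-rank-and-prefix closure
-- over the hierarchy list (objective: simpler). Python returns a set[str], which has no
-- specified iteration order, so both ports list the resulting set's elements in sorted order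
-- (the same canonical representation of the same set value).

-- ===== PORT A =====
-- 'scope in {"read_only", "operator", "admin"}'
def pvScopeValid (s : String) : Bool := s == "read_only" || s == "operator" || s == "admin"

def normalize_allowed_scopes_py (raw_scopes : String) : List String :=
  -- scopes = {part.strip().lower() for part in raw_scopes.split(",") if part.strip()}
  -- (split? is none only for separator "", and the separator here is ",")
  let scopes0 : PySem.Set String :=
    PySem.Set.ofList
      ((((PySem.Str.split? raw_scopes ",").getD []).filter
          (fun part => PySem.Str.strip part != "")).map
        (fun part => PySem.Str.lower (PySem.Str.strip part)))
  -- scopes = {scope for scope in scopes if scope in {"read_only", "operator", "admin"}}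
  let scopes1 : PySem.Set String := scopes0.filter pvScopeValid
  -- if "admin" in scopes: scopes.update({"operator", "read_only"})
  -- elif "operator" in scopes: scopes.add("read_only")
  let scopes2 : PySem.Set String :=
    if "admin" ∈ scopes1 then (scopes1.add "operator").add "read_only"
    else if "operator" ∈ scopes1 then scopes1.add "read_only"
    else scopes1
  -- if not scopes: scopes = {"read_only"}
  let scopes3 : PySem.Set String := if scopes2 = [] then ["read_only"] else scopes2
  PySem.List.sorted scopes3 (fun x => x)

-- ===== PORT B =====
def pvScopeOrder : List String := ["read_only", "operator", "admin"]

def normalize_allowed_scopes_py_alt (raw_scopes : String) : List String :=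
  -- parts = [p.strip().lower() for p in raw_scopes.split(",")]
  let parts : List String :=
    ((PySem.Str.split? raw_scopes ",").getD []).map
      (fun p => PySem.Str.lower (PySem.Str.strip p))
  -- m = max((order.index(s) for s in parts if s in order), default=0)
  -- (index? is some for every filtered s, since the filter requires s ∈ order)
  let m : Nat :=
    ((parts.filter (fun s => pvScopeOrder.contains s)).map
      (fun s => (PySem.List.index? pvScopeOrder s).getD 0)).foldl max 0
  -- return set(order[: m + 1])
  PySem.List.sorted (PySem.Set.ofList (pvScopeOrder.take (m + 1))) (fun x => x)

-- ===== PRECONDITION & SPEC =====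
def Spec_normalize_allowed_scopes_py (raw_scopes : String) (out : List String) : Prop := out = normalize_allowed_scopes_py_alt raw_scopes
instance (raw_scopes : String) (out : List String) : Decidable (Spec_normalize_allowed_scopes_py raw_scopes out) := by unfold Spec_normalize_allowed_scopes_py; infer_instance

-- ===== CLAIM (what is proved, stated in full; the proofs are below) =====
def Claim_equal_normalize_allowed_scopes_py : Prop := ∀ (raw_scopes : String), Dom_normalize_allowed_scopes_py raw_scopes → Spec_normalize_allowed_scopes_py raw_scopes (normalize_allowed_scopes_py raw_scopes)

-- ===== LEMMAS AND PROOFS =====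

-- helper: fold max over Nat, one step
theorem pv_foldl_max_cons (x : Nat) (l : List Nat) :
    (x :: l).foldl max 0 = max x (l.foldl max 0) := by
  have h : ∀ (l : List Nat) (a : Nat), l.foldl max a = max a (l.foldl max 0) := by
    intro l
    induction l with
    | nil => intro a; simp
    | cons y t ih => intro a; simp only [List.foldl_cons]; rw [ih (max a y), ih (max 0 y)]; omega
  simp only [List.foldl_cons]; rw [h l (max 0 x)]; omega

theorem pv_mem_norm (l0 : List String) (s : String) (hs : s ≠ "") :
    (s ∈ (l0.filter (fun p => PySem.Str.strip p != "")).map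
        (fun p => PySem.Str.lower (PySem.Str.strip p)) ↔
      s ∈ l0.map (fun p => PySem.Str.lower (PySem.Str.strip p))) := by
  simp only [List.mem_map, List.mem_filter]
  constructor
  · rintro ⟨p, ⟨hp, _⟩, hf⟩; exact ⟨p, hp, hf⟩
  · rintro ⟨p, hp, hf⟩
    refine ⟨p, ⟨hp, ?_⟩, hf⟩
    by_cases h : PySem.Str.strip p = ""
    · exact absurd (by rw [← hf, h]; rfl) hs
    · simp [h]

theorem pv_m_eq (ps : List String) :
    ((ps.filter (fun s => pvScopeOrder.contains s)).map
      (fun s => (PySem.List.index? pvScopeOrder s).getD 0)).foldl max 0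
    = if "admin" ∈ ps then 2 else if "operator" ∈ ps then 1 else 0 := by
  induction ps with
  | nil => simp
  | cons s t ih =>
    by_cases h1 : s = "admin"
    · subst h1
      rw [List.filter_cons, if_pos (show pvScopeOrder.contains "admin" = true from by decide),
        List.map_cons, pv_foldl_max_cons, ih]
      by_cases hA : "admin" ∈ t <;> by_cases hO : "operator" ∈ t <;>
        simp [List.mem_cons, hA, hO] <;> decide
    · by_cases h2 : s = "operator"
      · subst h2
        rw [List.filter_cons, if_pos (show pvScopeOrder.contains "operator" = true from by decide),
          List.map_cons, pv_foldl_max_cons, ih]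
        by_cases hA : "admin" ∈ t <;> by_cases hO : "operator" ∈ t <;>
          simp [List.mem_cons, hA, hO] <;>
          decide
      · by_cases h3 : s = "read_only"
        · subst h3
          rw [List.filter_cons, if_pos (show pvScopeOrder.contains "read_only" = true from by decide),
            List.map_cons, pv_foldl_max_cons, ih]
          by_cases hA : "admin" ∈ t <;> by_cases hO : "operator" ∈ t <;>
            simp [List.mem_cons, hA, hO] <;>
            decide
        · rw [List.filter_cons,
            if_neg (show ¬ pvScopeOrder.contains s = true from by
              simp [pvScopeOrder, List.contains_eq_mem, h1, h2, h3]), ih]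
          have e1 : ("admin" : String) ≠ s := fun h => h1 h.symm
          have e2 : ("operator" : String) ≠ s := fun h => h2 h.symm
          simp [List.mem_cons, e1, e2]

theorem pv_sorted_eq (xs ys : List String) (hndx : xs.Nodup) (hndy : ys.Nodup)
    (hpl : ys.Pairwise (· < ·)) (hm : ∀ x, x ∈ xs ↔ x ∈ ys) :
    PySem.List.sorted xs (fun x => x) = ys :=
  PySem.List.sorted_eq_of_perm_of_pairwise_lt xs ys _
    ((List.perm_ext_iff_of_nodup hndy hndx).mpr (fun a => (hm a).symm)) hpl

-- ===== VERDICT (by name: the statement is the Claim_ definition above) =====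
theorem normalize_allowed_scopes_py_spec : Claim_equal_normalize_allowed_scopes_py := by
  intro raw _
  show normalize_allowed_scopes_py raw = normalize_allowed_scopes_py_alt raw
  unfold normalize_allowed_scopes_py normalize_allowed_scopes_py_alt
  show PySem.List.sorted _ _ = PySem.List.sorted _ _
  generalize (PySem.Str.split? raw ",").getD [] = l0
  set lB := l0.map (fun p => PySem.Str.lower (PySem.Str.strip p)) with hlB
  set S1 : PySem.Set String :=
    (PySem.Set.ofList ((l0.filter (fun p => PySem.Str.strip p != "")).map
      (fun p => PySem.Str.lower (PySem.Str.strip p)))).filter pvScopeValid with hS1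
  have hndS1 : S1.Nodup := List.Nodup.filter _ (PySem.Set.nodup_ofList _)
  have hmemS1 : ∀ x, x ∈ S1 ↔ x ∈ lB ∧ pvScopeValid x = true := by
    intro x
    rw [hS1, List.mem_filter, PySem.Set.mem_ofList]
    constructor
    · rintro ⟨hx, hv⟩
      have hne : x ≠ "" := by rintro rfl; simp [pvScopeValid] at hv
      exact ⟨(pv_mem_norm l0 x hne).mp hx, hv⟩
    · rintro ⟨hx, hv⟩
      have hne : x ≠ "" := by rintro rfl; simp [pvScopeValid] at hv
      exact ⟨(pv_mem_norm l0 x hne).mpr hx, hv⟩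
  have hsub : ∀ x ∈ S1, x = "read_only" ∨ x = "operator" ∨ x = "admin" := by
    intro x hx
    have := ((hmemS1 x).mp hx).2
    simp only [pvScopeValid, Bool.or_eq_true, beq_iff_eq] at this
    tauto
  rw [pv_m_eq lB]
  by_cases ha : "admin" ∈ lB
  · have haS : "admin" ∈ S1 := (hmemS1 _).mpr ⟨ha, by decide⟩
    rw [if_pos haS, if_pos ha]
    have hne : ((S1.add "operator").add "read_only" : PySem.Set String) ≠ [] :=
      List.ne_nil_of_mem ((PySem.Set.mem_add _ _ _).mpr (Or.inl ((PySem.Set.mem_add _ _ _).mpr (Or.inl haS))))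
    rw [if_neg hne]
    rw [pv_sorted_eq _ ["admin", "operator", "read_only"]
      (PySem.Set.nodup_add _ _ (PySem.Set.nodup_add _ _ hndS1))
      (by decide) (by simp; exact ⟨by decide, by decide⟩)
      (by
        intro x
        simp only [PySem.Set.mem_add, List.mem_cons, List.not_mem_nil, or_false]
        constructor
        · rintro ((hx | rfl) | rfl)
          · rcases hsub x hx with rfl | rfl | rfl <;> tauto
          · tauto
          · tauto
        · rintro (rfl | rfl | rfl)
          · exact Or.inl (Or.inl haS)
          · exact Or.inl (Or.inr rfl)
          · exact Or.inr rfl)]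
    show _ = PySem.List.sorted (PySem.Set.ofList (pvScopeOrder.take 3)) _
    simp [pvScopeOrder, PySem.Set.ofList, PySem.List.sorted, PySem.List.insertBy]
    decide
  · have haS : "admin" ∉ S1 := fun h => ha ((hmemS1 _).mp h).1
    rw [if_neg haS, if_neg ha]
    by_cases ho : "operator" ∈ lB
    · have hoS : "operator" ∈ S1 := (hmemS1 _).mpr ⟨ho, by decide⟩
      rw [if_pos hoS, if_pos ho]
      have hne : (S1.add "read_only" : PySem.Set String) ≠ [] :=
        List.ne_nil_of_mem ((PySem.Set.mem_add _ _ _).mpr (Or.inl hoS))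
      rw [if_neg hne]
      rw [pv_sorted_eq _ ["operator", "read_only"]
        (PySem.Set.nodup_add _ _ hndS1)
        (by decide) (by simp; decide)
        (by
          intro x
          simp only [PySem.Set.mem_add, List.mem_cons, List.not_mem_nil, or_false]
          constructor
          · rintro (hx | rfl)
            · rcases hsub x hx with rfl | rfl | rfl
              · tauto
              · tauto
              · exact absurd hx haS
            · tauto
          · rintro (rfl | rfl)
            · exact Or.inl hoS
            · exact Or.inr rfl)]
      show _ = PySem.List.sorted (PySem.Set.ofList (pvScopeOrder.take 2)) _
      simp [pvScopeOrder, PySem.Set.ofList, PySem.List.sorted, PySem.List.insertBy]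
      decide
    · have hoS : "operator" ∉ S1 := fun h => ho ((hmemS1 _).mp h).1
      rw [if_neg hoS, if_neg ho]
      have hgoal : PySem.List.sorted (if (S1 : List String) = [] then ["read_only"] else S1) (fun x => x) = ["read_only"] := by
        split_ifs with hS
        · rfl
        · rcases List.exists_mem_of_ne_nil _ hS with ⟨x, hx⟩
          have hxr : x = "read_only" := by
            rcases hsub x hx with rfl | rfl | rfl
            · rfl
            · exact absurd hx hoS
            · exact absurd hx haS
          subst hxr
          exact pv_sorted_eq _ ["read_only"] hndS1 (by decide) (by decide)
            (fun y => ⟨fun hy => by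
              rcases hsub y hy with rfl | rfl | rfl
              · simp
              · exact absurd hy hoS
              · exact absurd hy haS,
              fun hy => by simp at hy; subst hy; exact hx⟩)
      rw [hgoal]
      show _ = PySem.List.sorted (PySem.Set.ofList (pvScopeOrder.take 1)) _
      decide
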